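-- pv_equiv track=rewrite | github.com/mdhabibullahmahmudncs13/ShikkhaSathi | backend/app/api/api_v1/endpoints/learning_content.py | _determine_bloom_level_for_section
-- ===== SOURCE A (Python) =====
-- def _determine_bloom_level_for_section(content: str) -> int:
--     """Determine Bloom's taxonomy level for a content section"""
--     # Analyze content complexity
--     content_lower = content.lower()
--
--     # Level 4 (Analyze) indicators
--     if any(word in content_lower for word in ['analyze', 'compare', 'contrast', 'examine', 'investigate']):
--         return 4
--
--     # Level 3 (Apply) indicators
--     if any(word in content_lower for word in ['apply', 'solve', 'calculate', 'demonstrate', 'use']):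
--         return 3
--
--     # Level 2 (Understand) indicators
--     if any(word in content_lower for word in ['explain', 'describe', 'interpret', 'summarize']):
--         return 2
--
--     # Default to Level 1 (Remember)
--     return 1
-- ===== SOURCE B (Python) =====
-- _BLOOM_KEYWORDS = [
--     ('analyze', 4), ('compare', 4), ('contrast', 4), ('examine', 4), ('investigate', 4),
--     ('apply', 3), ('solve', 3), ('calculate', 3), ('demonstrate', 3), ('use', 3),
--     ('explain', 2), ('describe', 2), ('interpret', 2), ('summarize', 2),
-- ]
--
--
-- def _determine_bloom_level_for_section(content: str) -> int:
--     """Determine Bloom's taxonomy level for a content section.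
--
--     Single left-to-right scan over the text positions: at each position try
--     every keyword as a prefix match and keep the best (highest) level seen.
--     """
--     text = content.lower()
--     best = 1
--     for i in range(len(text)):
--         for kw, level in _BLOOM_KEYWORDS:
--             if level > best and text.startswith(kw, i):
--                 best = level
--     return best
-- ===== Notes on version B (the rewrite author's own statement) =====
-- stated objective: alternative
-- what changed: Replaced the priority-ordered cascade of substring-membership tests by a single position-driven scan of the text that prefix-matches a flat (keyword, level) list at every index and keeps a running maximum level.
import Mathlib
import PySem

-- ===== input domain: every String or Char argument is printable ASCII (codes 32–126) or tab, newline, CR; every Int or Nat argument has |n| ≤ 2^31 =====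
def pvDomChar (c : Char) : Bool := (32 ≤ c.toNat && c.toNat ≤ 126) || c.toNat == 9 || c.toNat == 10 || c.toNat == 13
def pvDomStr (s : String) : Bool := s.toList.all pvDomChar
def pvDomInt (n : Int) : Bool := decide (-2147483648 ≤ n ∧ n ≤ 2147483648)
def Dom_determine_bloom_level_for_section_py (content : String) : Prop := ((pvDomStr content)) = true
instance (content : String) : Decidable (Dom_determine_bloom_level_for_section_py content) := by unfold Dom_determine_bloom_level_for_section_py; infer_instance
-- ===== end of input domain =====

-- B: priority early-return substring cascade replaced by a single position scan with prefix matching and a running max; alternative decomposition, same result.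


-- ===== PORT A =====
def determine_bloom_level_for_section_py (content : String) : Int :=
  let content_lower := PySem.Str.lower content
  if (["analyze", "compare", "contrast", "examine", "investigate"].any
      (fun word => PySem.Str.isIn word content_lower)) then 4
  else if (["apply", "solve", "calculate", "demonstrate", "use"].any
      (fun word => PySem.Str.isIn word content_lower)) then 3
  else if (["explain", "describe", "interpret", "summarize"].any
      (fun word => PySem.Str.isIn word content_lower)) then 2
  else 1

-- ===== PORT B =====
-- the flat (keyword, level) list of Source B (keywords as char lists)
def bloomKeywords : List (List Char × Int) :=
  [("analyze".toList, 4), ("compare".toList, 4), ("contrast".toList, 4),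
   ("examine".toList, 4), ("investigate".toList, 4),
   ("apply".toList, 3), ("solve".toList, 3), ("calculate".toList, 3),
   ("demonstrate".toList, 3), ("use".toList, 3),
   ("explain".toList, 2), ("describe".toList, 2), ("interpret".toList, 2),
   ("summarize".toList, 2)]

def determine_bloom_level_for_section_py_alt (content : String) : Int :=
  let text := (PySem.Str.lower content).toList
  (List.range text.length).foldl
    (fun best i =>
      bloomKeywords.foldl
        (fun b p => if b < p.2 && p.1.isPrefixOf (text.drop i) then p.2 else b) best)
    1

-- ===== PRECONDITION & SPEC =====
def Spec_determine_bloom_level_for_section_py (content : String) (out : Int) : Prop := out = determine_bloom_level_for_section_py_alt content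
instance (content : String) (out : Int) : Decidable (Spec_determine_bloom_level_for_section_py content out) := by unfold Spec_determine_bloom_level_for_section_py; infer_instance

-- ===== CLAIM (what is proved, stated in full; the proofs are below) =====
def Claim_equal_determine_bloom_level_for_section_py : Prop := ∀ (content : String), Dom_determine_bloom_level_for_section_py content → Spec_determine_bloom_level_for_section_py content (determine_bloom_level_for_section_py content)

-- ===== LEMMAS AND PROOFS =====

-- the inner guarded fold equals a fold of maxes (provided the accumulator is ≥ 1)
theorem inner_eq_max (s : List Char) :
    ∀ (l : List (List Char × Int)) (b : Int), 1 ≤ b →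
      l.foldl (fun b p => if b < p.2 && p.1.isPrefixOf s then p.2 else b) b
      = l.foldl (fun b p => max b (if p.1.isPrefixOf s then p.2 else 1)) b := by
  intro l
  induction l with
  | nil => intro b _; rfl
  | cons p l ih =>
      intro b hb
      simp only [List.foldl_cons]
      by_cases hp : p.1.isPrefixOf s = true
      · by_cases hlt : b < p.2
        · rw [show (if b < p.2 && p.1.isPrefixOf s then p.2 else b) = p.2 by simp [hp, hlt],
              show max b (if p.1.isPrefixOf s then p.2 else 1) = p.2 by simp [hp]; omega]
          exact ih p.2 (by omega)
        · rw [show (if b < p.2 && p.1.isPrefixOf s then p.2 else b) = b by simp [hlt],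
              show max b (if p.1.isPrefixOf s then p.2 else 1) = b by simp [hp]; omega]
          exact ih b hb
      · rw [show (if b < p.2 && p.1.isPrefixOf s then p.2 else b) = b by simp [hp],
            show max b (if p.1.isPrefixOf s then p.2 else 1) = b by simp [hp]; omega]
        exact ih b hb

-- a fold of maxes started at (max b c) pulls b outside
theorem foldl_max_shift {α : Type} (f : α → Int) :
    ∀ (l : List α) (b c : Int),
      l.foldl (fun b x => max b (f x)) (max b c) = max b (l.foldl (fun b x => max b (f x)) c) := by
  intro l
  induction l with
  | nil => intro b c; rfl
  | cons x l ih =>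
      intro b c
      simp only [List.foldl_cons]
      rw [max_assoc, ih]

theorem foldl_max_ge {α : Type} (f : α → Int) :
    ∀ (l : List α) (b k : Int),
      k ≤ l.foldl (fun b x => max b (f x)) b ↔ k ≤ b ∨ ∃ x ∈ l, k ≤ f x := by
  intro l
  induction l with
  | nil => simp
  | cons x l ih =>
      intro b k
      simp only [List.foldl_cons, ih, le_max_iff, List.mem_cons]
      constructor
      · rintro ((h | h) | ⟨y, hy, h⟩)
        · exact Or.inl h
        · exact Or.inr ⟨x, Or.inl rfl, h⟩
        · exact Or.inr ⟨y, Or.inr hy, h⟩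
      · rintro (h | ⟨y, (rfl | hy), h⟩)
        · exact Or.inl (Or.inl h)
        · exact Or.inl (Or.inr h)
        · exact Or.inr ⟨y, hy, h⟩

theorem foldl_max_le {α : Type} (f : α → Int) :
    ∀ (l : List α) (b k : Int),
      l.foldl (fun b x => max b (f x)) b ≤ k ↔ b ≤ k ∧ ∀ x ∈ l, f x ≤ k := by
  intro l
  induction l with
  | nil => simp
  | cons x l ih =>
      intro b k
      simp only [List.foldl_cons, ih, max_le_iff, List.mem_cons]
      constructor
      · rintro ⟨⟨hb, hx⟩, h⟩
        exact ⟨hb, fun y hy => by rcases hy with rfl | hy; exact hx; exact h y hy⟩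
      · rintro ⟨hb, h⟩
        exact ⟨⟨hb, h x (Or.inl rfl)⟩, fun y hy => h y (Or.inr hy)⟩

-- value of the inner fold at position i, in max form
def innerVal (t : List Char) (i : Nat) : Int :=
  bloomKeywords.foldl (fun b p => max b (if p.1.isPrefixOf (t.drop i) then p.2 else 1)) 1

-- B's whole double fold, rewritten as a fold of maxes of innerVal
theorem outer_eq_max (t : List Char) :
    ∀ (L : List Nat) (b : Int), 1 ≤ b →
      L.foldl (fun best i =>
          bloomKeywords.foldl
            (fun b p => if b < p.2 && p.1.isPrefixOf (t.drop i) then p.2 else b) best) b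
      = L.foldl (fun best i => max best (innerVal t i)) b := by
  intro L
  induction L with
  | nil => intro b _; rfl
  | cons i L ih =>
      intro b hb
      simp only [List.foldl_cons]
      have key : bloomKeywords.foldl
          (fun b p => if b < p.2 && p.1.isPrefixOf (t.drop i) then p.2 else b) b
          = max b (innerVal t i) := by
        rw [inner_eq_max (t.drop i) bloomKeywords b hb]
        conv_lhs => rw [show b = max b 1 by omega]
        rw [foldl_max_shift]
        rfl
      rw [key]
      have h1 : (1:Int) ≤ max b (innerVal t i) := le_trans hb (le_max_left _ _)
      exact ih _ h1

-- a nonempty keyword occurring as a prefix of some suffix occurs at an index < length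
theorem prefix_drop_lt (t kw : List Char) (hkw : kw ≠ []) :
    (∃ i ∈ List.range t.length, kw <+: t.drop i) ↔ ∃ j, kw <+: t.drop j := by
  constructor
  · rintro ⟨i, _, h⟩; exact ⟨i, h⟩
  · rintro ⟨j, h⟩
    by_cases hj : j < t.length
    · exact ⟨j, List.mem_range.mpr hj, h⟩
    · exfalso
      rw [List.drop_eq_nil_of_le (by omega)] at h
      exact hkw (List.prefix_nil.mp h)

-- Str.isIn as existence of a prefix position strictly inside the text
theorem isIn_iff_pos (w : String) (cl : String) (hw : w.toList ≠ []) :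
    PySem.Str.isIn w cl = true ↔ ∃ i ∈ List.range cl.toList.length, w.toList.isPrefixOf (cl.toList.drop i) = true := by
  rw [PySem.Str.isIn_iff_infix, ← PySem.Chars.isIn_iff_infix,
      ← PySem.Chars.exists_prefix_drop_iff_isIn]
  simp only [List.isPrefixOf_iff_prefix]
  exact (prefix_drop_lt cl.toList w.toList hw).symm

-- ===== VERDICT (by name: the statement is the Claim_ definition above) =====
theorem determine_bloom_level_for_section_py_spec : Claim_equal_determine_bloom_level_for_section_py := by
  intro content _
  unfold Spec_determine_bloom_level_for_section_py
  simp only [determine_bloom_level_for_section_py, determine_bloom_level_for_section_py_alt]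
  set cl := PySem.Str.lower content with hcl
  set t := cl.toList with ht
  rw [outer_eq_max t (List.range t.length) 1 le_rfl]
  set r := (List.range t.length).foldl (fun best i => max best (innerVal t i)) 1 with hr
  -- characterize r by level
  have hge : ∀ k : Int, k ≤ r ↔ k ≤ 1 ∨ ∃ i ∈ List.range t.length, ∃ p ∈ bloomKeywords,
      k ≤ (if p.1.isPrefixOf (t.drop i) then p.2 else 1) := by
    intro k
    rw [hr, foldl_max_ge]
    constructor
    · rintro (h | ⟨i, hi, h⟩)
      · exact Or.inl h
      · unfold innerVal at h
        rcases (foldl_max_ge _ bloomKeywords 1 k).mp h with h | ⟨p, hp, h⟩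
        · exact Or.inl h
        · exact Or.inr ⟨i, hi, p, hp, h⟩
    · rintro (h | ⟨i, hi, p, hp, h⟩)
      · exact Or.inl h
      · refine Or.inr ⟨i, hi, ?_⟩
        unfold innerVal
        exact (foldl_max_ge _ bloomKeywords 1 k).mpr (Or.inr ⟨p, hp, h⟩)
  -- bridges: level-k match ↔ the corresponding any-of-isIn boolean
  have hmatch : ∀ lv : Int, ((∃ i ∈ List.range t.length, ∃ p ∈ bloomKeywords,
        lv = p.2 ∧ p.1.isPrefixOf (t.drop i) = true)
      ↔ ∃ w ∈ bloomKeywords.filter (fun p => p.2 == lv), ∃ i ∈ List.range t.length,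
        w.1.isPrefixOf (t.drop i) = true) := by
    intro lv
    constructor
    · rintro ⟨i, hi, p, hp, hl, hpre⟩
      exact ⟨p, List.mem_filter.mpr ⟨hp, by simp [hl]⟩, i, hi, hpre⟩
    · rintro ⟨p, hp, i, hi, hpre⟩
      rcases List.mem_filter.mp hp with ⟨hp, hl⟩
      exact ⟨i, hi, p, hp, by simpa using (beq_iff_eq.mp hl).symm, hpre⟩
  -- for each level boolean: any-isIn true ↔ ∃ matching position
  have hiff : ∀ (ws : List String) (lv : Int),
      (∀ w ∈ ws, w.toList ≠ []) →
      (bloomKeywords.filter (fun p => p.2 == lv) = ws.map (fun w => (w.toList, lv))) →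
      ((ws.any (fun word => PySem.Str.isIn word cl)) = true
        ↔ ∃ i ∈ List.range t.length, ∃ p ∈ bloomKeywords,
            lv = p.2 ∧ p.1.isPrefixOf (t.drop i) = true) := by
    intro ws lv hne hfil
    rw [hmatch lv, hfil, List.any_eq_true]
    constructor
    · rintro ⟨w, hw, hin⟩
      rcases (isIn_iff_pos w cl (hne w hw)).mp hin with ⟨i, hi, hpre⟩
      exact ⟨(w.toList, lv), List.mem_map.mpr ⟨w, hw, rfl⟩, i, hi, hpre⟩
    · rintro ⟨p, hp, i, hi, hpre⟩
      rcases List.mem_map.mp hp with ⟨w, hw, rfl⟩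
      exact ⟨w, hw, (isIn_iff_pos w cl (hne w hw)).mpr ⟨i, hi, hpre⟩⟩
  have h4 := hiff ["analyze", "compare", "contrast", "examine", "investigate"] 4
      (by decide) (by decide)
  have h3 := hiff ["apply", "solve", "calculate", "demonstrate", "use"] 3
      (by decide) (by decide)
  have h2 := hiff ["explain", "describe", "interpret", "summarize"] 2
      (by decide) (by decide)
  -- the if-value forms: k ≤ ite ... ↔ a keyword of level ≥ k matches; levels are 2..4
  have hlv : ∀ p ∈ bloomKeywords, p.2 = 2 ∨ p.2 = 3 ∨ p.2 = 4 := by decide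
  -- now case on the three booleans
  by_cases b4 : (["analyze", "compare", "contrast", "examine", "investigate"].any
      (fun word => PySem.Str.isIn word cl)) = true
  · -- r = 4
    have hge4 : (4:Int) ≤ r := by
      rcases (h4.mp b4) with ⟨i, hi, p, hp, hl, hpre⟩
      exact (hge 4).mpr (Or.inr ⟨i, hi, p, hp, by rw [if_pos hpre]; omega⟩)
    have hle4 : r ≤ 4 := by
      rw [hr]
      refine (foldl_max_le _ _ _ _).mpr ⟨by omega, fun i _ => ?_⟩
      unfold innerVal
      refine (foldl_max_le _ _ _ _).mpr ⟨by omega, fun p hp => ?_⟩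
      rcases hlv p hp with h | h | h <;> split <;> omega
    rw [if_pos b4]
    omega
  · by_cases b3 : (["apply", "solve", "calculate", "demonstrate", "use"].any
        (fun word => PySem.Str.isIn word cl)) = true
    · have hge3 : (3:Int) ≤ r := by
        rcases (h3.mp b3) with ⟨i, hi, p, hp, hl, hpre⟩
        exact (hge 3).mpr (Or.inr ⟨i, hi, p, hp, by rw [if_pos hpre]; omega⟩)
      have hle3 : r ≤ 3 := by
        rw [hr]
        refine (foldl_max_le _ _ _ _).mpr ⟨by omega, fun i hi => ?_⟩
        unfold innerVal
        refine (foldl_max_le _ _ _ _).mpr ⟨by omega, fun p hp => ?_⟩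
        by_cases hpre : p.1.isPrefixOf (t.drop i) = true
        · rcases hlv p hp with h | h | h
          · simp [hpre]; omega
          · simp [hpre]; omega
          · exfalso; exact b4 (h4.mpr ⟨i, hi, p, hp, h.symm, hpre⟩)
        · simp [hpre]
      rw [if_neg b4, if_pos b3]
      omega
    · by_cases b2 : (["explain", "describe", "interpret", "summarize"].any
          (fun word => PySem.Str.isIn word cl)) = true
      · have hge2 : (2:Int) ≤ r := by
          rcases (h2.mp b2) with ⟨i, hi, p, hp, hl, hpre⟩
          exact (hge 2).mpr (Or.inr ⟨i, hi, p, hp, by rw [if_pos hpre]; omega⟩)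
        have hle2 : r ≤ 2 := by
          rw [hr]
          refine (foldl_max_le _ _ _ _).mpr ⟨by omega, fun i hi => ?_⟩
          unfold innerVal
          refine (foldl_max_le _ _ _ _).mpr ⟨by omega, fun p hp => ?_⟩
          by_cases hpre : p.1.isPrefixOf (t.drop i) = true
          · rcases hlv p hp with h | h | h
            · simp [hpre]; omega
            · exfalso; exact b3 (h3.mpr ⟨i, hi, p, hp, h.symm, hpre⟩)
            · exfalso; exact b4 (h4.mpr ⟨i, hi, p, hp, h.symm, hpre⟩)
          · simp [hpre]
        rw [if_neg b4, if_neg b3, if_pos b2]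
        omega
      · -- r = 1
        have hle1 : r ≤ 1 := by
          rw [hr]
          refine (foldl_max_le _ _ _ _).mpr ⟨by omega, fun i hi => ?_⟩
          unfold innerVal
          refine (foldl_max_le _ _ _ _).mpr ⟨by omega, fun p hp => ?_⟩
          by_cases hpre : p.1.isPrefixOf (t.drop i) = true
          · exfalso
            rcases hlv p hp with h | h | h
            · exact b2 (h2.mpr ⟨i, hi, p, hp, h.symm, hpre⟩)
            · exact b3 (h3.mpr ⟨i, hi, p, hp, h.symm, hpre⟩)
            · exact b4 (h4.mpr ⟨i, hi, p, hp, h.symm, hpre⟩)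
          · simp [hpre]
        have hge1 : (1:Int) ≤ r := (hge 1).mpr (Or.inl le_rfl)
        rw [if_neg b4, if_neg b3, if_neg b2]
        omega
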